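-- pv_equiv track=rewrite | github.com/arriberelab/arriberelab | 250811_WohlenbergCatp6Paper/polarityScore.py | restrict
-- ===== SOURCE A (Python) =====
-- import sys, common, collections
--
-- def restrict(inList,N):
--     """
--     inList is a list of dicts, each dict of the format:
--     {wbgene:{position:ct}}.
--     Will ID wbgenes with a total of at least N cts in all list entries.
--     Will return a list of dicts with those genes.
--     """
--     aa=collections.defaultdict(list)
--     for inDict in inList:
--         for wbgene,temp in inDict.items():
--             aa[wbgene].append(sum(temp.values()))
--     bb=[]
--     for k,v in aa.items():
--         if len(v)==len(inList) and min(v)>=N: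
--             bb.append(k)
--     cc=[]
--     for inDict in inList:
--         tempDict={}
--         for k,v in inDict.items():
--             if k in bb:
--                 tempDict[k]=inDict[k]
--         cc.append(tempDict)
--     return cc
-- ===== SOURCE B (Python) =====
-- def restrict(inList, N):
--     qualifying = [{g for g, posd in d.items() if sum(posd.values()) >= N}
--                   for d in inList]
--     keep = set.intersection(*qualifying) if qualifying else set()
--     return [{g: v for g, v in d.items() if g in keep} for d in inList]
-- ===== Notes on version B (the rewrite author's own statement) =====
-- stated objective: idiomatic
-- what changed: Replaces A's defaultdict grouping of per-dict sums followed by a len==n/min>=N filter and a 'k in bb' list scan per key with per-dict threshold sets intersected once and set-membership trimming.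
import Mathlib
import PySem

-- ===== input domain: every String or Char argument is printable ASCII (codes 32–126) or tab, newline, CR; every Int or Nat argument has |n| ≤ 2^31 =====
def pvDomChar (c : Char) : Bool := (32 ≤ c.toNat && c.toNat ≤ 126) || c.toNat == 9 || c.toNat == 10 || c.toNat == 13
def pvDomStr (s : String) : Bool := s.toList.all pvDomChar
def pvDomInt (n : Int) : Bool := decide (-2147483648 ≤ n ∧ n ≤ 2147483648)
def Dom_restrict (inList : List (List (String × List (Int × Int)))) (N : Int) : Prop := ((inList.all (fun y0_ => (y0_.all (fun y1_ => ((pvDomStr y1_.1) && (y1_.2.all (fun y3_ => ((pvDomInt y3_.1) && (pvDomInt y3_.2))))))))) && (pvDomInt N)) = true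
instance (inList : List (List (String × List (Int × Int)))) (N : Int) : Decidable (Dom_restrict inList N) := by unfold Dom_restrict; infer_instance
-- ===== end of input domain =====

-- B replaces A's grouped-sums-then-min filter by per-dict threshold sets intersected once, with
-- set-membership trimming instead of A's `k in bb` list scan; objective: idiomatic.

-- sum(temp.values()) — shared built-in helper
def pvSum (temp : List (Int × Int)) : Int := (temp.map (fun p => p.2)).sum

-- ===== PORT A =====
def restrict (inList : List (List (String × List (Int × Int)))) (N : Int) : List (List (String × List (Int × Int))) :=
  -- aa = defaultdict(list); for inDict in inList: for wbgene,temp in inDict.items(): aa[wbgene].append(sum(temp.values()))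
  let aa : PySem.Dict String (List Int) :=
    inList.foldl (fun aa inDict =>
      inDict.foldl (fun aa p => aa.modify p.1 [] (fun v => v ++ [pvSum p.2])) aa) PySem.Dict.empty
  -- bb: keys with len(v)==len(inList) and min(v)>=N  (min only evaluated after the length test; v is
  -- then nonempty, so the .getD 0 default of min? is never the value used)
  let bb : List String :=
    aa.items.foldl (fun bb kv =>
      if kv.2.length = inList.length then
        (if N ≤ (PySem.List.min? kv.2 (fun x => x)).getD 0 then bb ++ [kv.1] else bb)
      else bb) []
  -- cc: per dict, tempDict = {k: inDict[k] for k,v in items if k in bb}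
  let cc : List (List (String × List (Int × Int))) :=
    inList.foldl (fun cc inDict =>
      let tempDict : PySem.Dict String (List (Int × Int)) :=
        inDict.foldl (fun td p =>
          if bb.contains p.1 then
            -- inDict[k]: dict lookup, first match; the default p.2 is unreachable since p ∈ inDict
            td.insert p.1 ((PySem.Dict.mk inDict).getD p.1 p.2)
          else td) PySem.Dict.empty
      cc ++ [tempDict.items]) []
  cc

-- ===== PORT B =====
def restrict_alt (inList : List (List (String × List (Int × Int)))) (N : Int) : List (List (String × List (Int × Int))) :=
  -- qualifying = [{g for g,posd in d.items() if sum(posd.values()) >= N} for d in inList]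
  let qualifying : List (PySem.Set String) :=
    inList.map (fun d => PySem.Set.ofList ((d.filter (fun p => N ≤ pvSum p.2)).map (fun p => p.1)))
  -- keep = set.intersection(*qualifying) if qualifying else set()
  let keep : PySem.Set String :=
    match qualifying with
    | [] => PySem.Set.empty
    | s :: rest => rest.foldl (fun a b => PySem.Set.inter a b) s
  -- [{g: v for g,v in d.items() if g in keep} for d in inList]
  inList.map (fun d => d.filter (fun p => keep.contains p.1))

-- ===== PRECONDITION & SPEC =====
-- Pre_ excludes inputs whose inner association lists carry duplicate keys: those do not encode a
-- Python dict (a dict literal collapses duplicates before A ever sees them), so neither port's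
-- behaviour there corresponds to running the Python.
def Pre_restrict (inList : List (List (String × List (Int × Int)))) (_N : Int) : Prop :=
  ∀ d ∈ inList, (d.map (fun p => p.1)).Nodup
instance (inList : List (List (String × List (Int × Int)))) (N : Int) : Decidable (Pre_restrict inList N) := by unfold Pre_restrict; infer_instance
def pvWitness_restrict : (List (List (String × List (Int × Int)))) × Int :=
  ([[("a", [((0:Int), (3:Int))])], [("a", [((1:Int), (2:Int))]), ("b", [((0:Int), (9:Int))])]], (2:Int))
def Spec_restrict (inList : List (List (String × List (Int × Int)))) (N : Int) (out : List (List (String × List (Int × Int)))) : Prop := out = restrict_alt inList N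
instance (inList : List (List (String × List (Int × Int)))) (N : Int) (out : List (List (String × List (Int × Int)))) : Decidable (Spec_restrict inList N out) := by unfold Spec_restrict; infer_instance

-- ===== CLAIM (what is proved, stated in full; the proofs are below) =====
def Claim_equal_restrict : Prop := ∀ (inList : List (List (String × List (Int × Int)))) (N : Int), Dom_restrict inList N → Pre_restrict inList N → Spec_restrict inList N (restrict inList N)

-- ===== LEMMAS AND PROOFS =====

-- the list of per-dict sums A groups under key k
def pvG (inList : List (List (String × List (Int × Int)))) (k : String) : List Int :=
  ((inList.flatMap (fun d => d.map (fun p => (p.1, pvSum p.2)))).filter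
    (fun q => q.1 == k)).map (fun q => q.2)

-- gene k qualifies in dict d
def pvQual (N : Int) (d : List (String × List (Int × Int))) (k : String) : Prop :=
  ∃ t, (k, t) ∈ d ∧ N ≤ pvSum t

theorem pv_foldl_if_skip {α β : Type} (c : α → Bool) (f : β → α → β) :
    ∀ (l : List α) (a : β),
      l.foldl (fun acc x => if c x then f acc x else acc) a = (l.filter c).foldl f a := by
  intro l
  induction l with
  | nil => intro a; rfl
  | cons x t ih =>
    intro a
    by_cases h : c x = true <;> simp [h, ih]

theorem pv_foldl_congr {α β : Type} {f g : β → α → β} :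
    ∀ (l : List α) (a : β), (∀ b, ∀ x ∈ l, f b x = g b x) → l.foldl f a = l.foldl g a := by
  intro l
  induction l with
  | nil => intro a _; rfl
  | cons x t ih =>
    intro a h
    simp only [List.foldl_cons]
    rw [h a x (by simp)]
    exact ih _ (fun b y hy => h b y (List.mem_cons_of_mem _ hy))

theorem pv_foldl_flatMap {α β γ : Type} (g : α → List β) (f : γ → β → γ) :
    ∀ (l : List α) (a : γ),
      (l.flatMap g).foldl f a = l.foldl (fun a x => (g x).foldl f a) a := by
  intro l
  induction l with
  | nil => intro a; rfl
  | cons x t ih => intro a; simp [List.flatMap_cons, List.foldl_append, ih]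

theorem pvG_cons (d : List (String × List (Int × Int))) (t : List (List (String × List (Int × Int)))) (k : String) :
    pvG (d :: t) k =
      ((d.filter (fun p => p.1 == k)).map (fun p => pvSum p.2)) ++ pvG t k := by
  unfold pvG
  simp only [List.flatMap_cons, List.filter_append, List.map_append, List.filter_map, List.map_map]
  rfl

-- A's aa, as a function
def pvAA (inList : List (List (String × List (Int × Int)))) : PySem.Dict String (List Int) :=
  inList.foldl (fun aa inDict =>
    inDict.foldl (fun aa p => aa.modify p.1 [] (fun v => v ++ [pvSum p.2])) aa) PySem.Dict.empty

theorem pvAA_getD (inList : List (List (String × List (Int × Int)))) (k : String) :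
    (pvAA inList).getD k [] = pvG inList k := by
  have h : pvAA inList =
      (inList.flatMap (fun d => d.map (fun p => (p.1, pvSum p.2)))).foldl
        (fun aa q => aa.modify q.1 [] (fun v => v ++ [q.2])) PySem.Dict.empty := by
    rw [pv_foldl_flatMap]
    unfold pvAA
    apply pv_foldl_congr
    intro a x _
    rw [List.foldl_map]
  rw [h, PySem.Dict.getD_foldl_modify_append]
  simp [pvG, PySem.Dict.getD_empty]

theorem pv_nodup_fold (L : List (List (String × List (Int × Int)))) :
    ∀ (d : PySem.Dict String (List Int)), d.keys.Nodup →
      (L.foldl (fun aa inDict =>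
        inDict.foldl (fun aa p => aa.modify p.1 [] (fun v => v ++ [pvSum p.2])) aa) d).keys.Nodup := by
  induction L with
  | nil => intro d h; exact h
  | cons d0 t ih =>
    intro d h
    exact ih _ (PySem.Dict.nodup_keys_foldl_modify_key d0 (fun p => p.1) []
      (fun _ p => fun v => v ++ [pvSum p.2]) d h)

theorem pvAA_nodup (inList : List (List (String × List (Int × Int)))) :
    (pvAA inList).keys.Nodup :=
  pv_nodup_fold inList PySem.Dict.empty PySem.Dict.nodup_keys_empty

-- nonempty min characterisation
theorem pv_min_ge (v : List Int) (N : Int) (hv : v ≠ []) :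
    (N ≤ (PySem.List.min? v (fun x => x)).getD 0) ↔ (∀ x ∈ v, N ≤ x) := by
  cases hm : PySem.List.min? v (fun x => x) with
  | none => exact absurd ((PySem.List.min?_eq_none_iff v _).mp hm) hv
  | some m =>
    simp only [Option.getD_some]
    constructor
    · intro hN x hx
      exact le_trans hN (PySem.List.min?_isMin hm x hx)
    · intro h
      exact h m (PySem.List.min?_mem hm)

-- a Nodup-key dict contains k at most once
theorem pv_filter_key (d : List (String × List (Int × Int))) (k : String)
    (hnd : (d.map (fun p => p.1)).Nodup) :
    (d.filter (fun p => p.1 == k) = [] ∧ ¬ ∃ t, (k, t) ∈ d) ∨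
      (∃ t, (k, t) ∈ d ∧ d.filter (fun p => p.1 == k) = [(k, t)]) := by
  induction d with
  | nil => left; simp
  | cons p rest ih =>
    simp only [List.map_cons, List.nodup_cons] at hnd
    obtain ⟨hp, hrest⟩ := hnd
    by_cases hk : p.1 = k
    · right
      refine ⟨p.2, by simp [← hk], ?_⟩
      rw [List.filter_cons_of_pos (by simp [hk])]
      have : rest.filter (fun p => p.1 == k) = [] := by
        rw [List.filter_eq_nil_iff]
        intro q hq hq'
        exact hp (by rw [hk, ← (by simpa using hq' : q.1 = k)]; exact List.mem_map_of_mem hq)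
      rw [this, ← hk]
    · rw [List.filter_cons_of_neg (by simp [hk])]
      rcases ih hrest with ⟨h1, h2⟩ | ⟨t, ht, hf⟩
      · left
        refine ⟨h1, ?_⟩
        rintro ⟨t, ht⟩
        rcases List.mem_cons.mp ht with h | h
        · exact hk (by rw [← h])
        · exact h2 ⟨t, h⟩
      · right; exact ⟨t, List.mem_cons_of_mem _ ht, hf⟩

-- P: A's acceptance condition on the grouped list
theorem pvP_iff (inList : List (List (String × List (Int × Int)))) (N : Int) (k : String)
    (hpre : ∀ d ∈ inList, (d.map (fun p => p.1)).Nodup) :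
    ((pvG inList k).length = inList.length ∧ ∀ x ∈ pvG inList k, N ≤ x) ↔
      ∀ d ∈ inList, pvQual N d k := by
  induction inList with
  | nil => simp [pvG]
  | cons d t ih =>
    have hd := hpre d (by simp)
    have hpt : ∀ d' ∈ t, (d'.map (fun p => p.1)).Nodup :=
      fun d' hd' => hpre d' (List.mem_cons_of_mem _ hd')
    rw [pvG_cons]
    have hlen1 : (d.filter (fun p => p.1 == k)).length ≤ 1 := by
      rcases pv_filter_key d k hd with ⟨h, _⟩ | ⟨t', _, h⟩ <;> simp [h]
    have hGlen : ∀ (L : List (List (String × List (Int × Int)))),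
        (∀ d' ∈ L, (d'.map (fun p => p.1)).Nodup) → (pvG L k).length ≤ L.length := by
      intro L
      induction L with
      | nil => intro _; simp [pvG]
      | cons d' t' ih' =>
        intro hL
        rw [pvG_cons]
        have h1 : (d'.filter (fun p => p.1 == k)).length ≤ 1 := by
          rcases pv_filter_key d' k (hL d' (by simp)) with ⟨h, _⟩ | ⟨t'', _, h⟩ <;> simp [h]
        have := ih' (fun x hx => hL x (List.mem_cons_of_mem _ hx))
        simp only [List.length_append, List.length_map, List.length_cons]
        omega
    constructor
    · rintro ⟨hlen, hall⟩
      simp only [List.length_append, List.length_map, List.length_cons] at hlen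
      have htlen := hGlen t hpt
      have hd1 : (d.filter (fun p => p.1 == k)).length = 1 := by omega
      have htl : (pvG t k).length = t.length := by omega
      rcases pv_filter_key d k hd with ⟨h, _⟩ | ⟨t', ht', hf⟩
      · rw [h] at hd1; simp at hd1
      · intro d' hd'
        rcases List.mem_cons.mp hd' with rfl | hmem
        · exact ⟨t', ht', hall (pvSum t') (by simp [hf])⟩
        · exact (ih hpt).mp ⟨htl, fun x hx => hall x (by simp [hx])⟩ d' hmem
    · intro h
      have hdq := h d (by simp)
      obtain ⟨t', ht', hge⟩ := hdq
      rcases pv_filter_key d k hd with ⟨_, hno⟩ | ⟨t'', ht'', hf⟩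
      · exact absurd ⟨t', ht'⟩ hno
      · have hrest := (ih hpt).mpr (fun d' hd' => h d' (List.mem_cons_of_mem _ hd'))
        have ht'eq : t' = t'' := by
          have : (k, t') ∈ d.filter (fun p => p.1 == k) := by
            simp [List.mem_filter, ht']
          rw [hf] at this; simpa using this
        refine ⟨?_, ?_⟩
        · simp [hf, hrest.1]
        · intro x hx
          rcases List.mem_append.mp hx with hx | hx
          · simp [hf] at hx
            rw [hx, ← ht'eq]; exact hge
          · exact hrest.2 x hx

-- A's bb, as a function
def pvBB (inList : List (List (String × List (Int × Int)))) (N : Int) : List String :=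
  (pvAA inList).items.foldl (fun bb kv =>
    if kv.2.length = inList.length then
      (if N ≤ (PySem.List.min? kv.2 (fun x => x)).getD 0 then bb ++ [kv.1] else bb)
    else bb) []

theorem pv_mem_bb (inList : List (List (String × List (Int × Int)))) (N : Int) (k : String)
    (hne : inList ≠ []) (hpre : ∀ d ∈ inList, (d.map (fun p => p.1)).Nodup) :
    k ∈ pvBB inList N ↔ ∀ d ∈ inList, pvQual N d k := by
  have hnz : 0 < inList.length := List.length_pos_iff.mpr hne
  rw [← pvP_iff inList N k hpre]
  unfold pvBB
  have hfold :
      (pvAA inList).items.foldl (fun bb kv =>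
        if kv.2.length = inList.length then
          (if N ≤ (PySem.List.min? kv.2 (fun x => x)).getD 0 then bb ++ [kv.1] else bb)
        else bb) [] =
      ((pvAA inList).items.filter (fun kv =>
          decide (kv.2.length = inList.length) &&
          decide (N ≤ (PySem.List.min? kv.2 (fun x => x)).getD 0))).map (fun kv => kv.1) := by
    rw [show ((pvAA inList).items.foldl (fun bb kv =>
        if kv.2.length = inList.length then
          (if N ≤ (PySem.List.min? kv.2 (fun x => x)).getD 0 then bb ++ [kv.1] else bb)
        else bb) []) =
      ((pvAA inList).items.foldl (fun bb kv =>
        if (decide (kv.2.length = inList.length) &&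
            decide (N ≤ (PySem.List.min? kv.2 (fun x => x)).getD 0)) then bb ++ [kv.1] else bb) []) from
      pv_foldl_congr _ _ (by
        intro b kv _
        by_cases h1 : kv.2.length = inList.length <;>
          by_cases h2 : N ≤ (PySem.List.min? kv.2 (fun x => x)).getD 0 <;> simp [h1, h2])]
    rw [PySem.List.foldl_append_if]
    simp
  rw [hfold]
  have hnd := pvAA_nodup inList
  constructor
  · intro hk
    obtain ⟨kv, hkv, rfl⟩ := List.mem_map.mp hk
    obtain ⟨hmem, hcond⟩ := List.mem_filter.mp hkv
    simp only [Bool.and_eq_true, decide_eq_true_eq] at hcond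
    have hget : (pvAA inList).getD kv.1 [] = kv.2 :=
      PySem.Dict.getD_of_mem_items _ (by exact hmem) hnd []
    rw [pvAA_getD] at hget
    rw [hget]
    refine ⟨hcond.1, ?_⟩
    have hvne : kv.2 ≠ [] := by
      intro h; rw [h] at hcond; simp at hcond; omega
    exact (pv_min_ge kv.2 N hvne).mp hcond.2
  · rintro ⟨hlen, hall⟩
    have hGne : pvG inList k ≠ [] := by
      intro h; rw [h] at hlen; simp at hlen; omega
    have hgetD : (pvAA inList).getD k [] = pvG inList k := pvAA_getD inList k
    have hsome : (pvAA inList).get? k = some (pvG inList k) := by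
      cases hg : (pvAA inList).get? k with
      | none =>
        exfalso
        have := PySem.Dict.getD_eq_get?_getD (pvAA inList) k ([] : List Int)
        rw [hg] at this; simp at this
        exact hGne (by rw [← hgetD, this])
      | some v =>
        have := PySem.Dict.getD_eq_get?_getD (pvAA inList) k ([] : List Int)
        rw [hg] at this; simp at this
        rw [← hgetD, this]
    have hmem : (k, pvG inList k) ∈ (pvAA inList).items :=
      (PySem.Dict.get?_eq_some_iff_mem_items _ _ _ hnd).mp hsome
    refine List.mem_map.mpr ⟨(k, pvG inList k), List.mem_filter.mpr ⟨hmem, ?_⟩, rfl⟩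
    simp only [Bool.and_eq_true, decide_eq_true_eq]
    exact ⟨hlen, (pv_min_ge _ N hGne).mpr hall⟩

-- B's keep, as a function
def pvKeep (inList : List (List (String × List (Int × Int)))) (N : Int) : PySem.Set String :=
  match inList.map (fun d => PySem.Set.ofList ((d.filter (fun p => N ≤ pvSum p.2)).map (fun p => p.1))) with
  | [] => PySem.Set.empty
  | s :: rest => rest.foldl (fun a b => PySem.Set.inter a b) s

theorem pv_mem_foldl_inter (rest : List (PySem.Set String)) :
    ∀ (s : PySem.Set String) (k : String),
      k ∈ rest.foldl (fun a b => PySem.Set.inter a b) s ↔ k ∈ s ∧ ∀ t ∈ rest, k ∈ t := by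
  induction rest with
  | nil => intro s k; simp
  | cons u r ih =>
    intro s k
    rw [List.foldl_cons, ih]
    rw [PySem.Set.mem_inter]
    constructor
    · rintro ⟨⟨h1, h2⟩, h3⟩
      exact ⟨h1, fun t ht => by rcases List.mem_cons.mp ht with rfl | ht' <;> [exact h2; exact h3 t ht']⟩
    · rintro ⟨h1, h2⟩
      exact ⟨⟨h1, h2 u (by simp)⟩, fun t ht => h2 t (List.mem_cons_of_mem _ ht)⟩

theorem pv_mem_keep (inList : List (List (String × List (Int × Int)))) (N : Int) (k : String)
    (hne : inList ≠ []) :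
    k ∈ pvKeep inList N ↔ ∀ d ∈ inList, pvQual N d k := by
  have hqual : ∀ (d : List (String × List (Int × Int))),
      (k ∈ PySem.Set.ofList ((d.filter (fun p => N ≤ pvSum p.2)).map (fun p => p.1))) ↔
      pvQual N d k := by
    intro d
    rw [PySem.Set.mem_ofList]
    simp only [List.mem_map, List.mem_filter, decide_eq_true_eq]
    constructor
    · rintro ⟨p, ⟨hp, hge⟩, rfl⟩
      exact ⟨p.2, hp, hge⟩
    · rintro ⟨t', ht', hge⟩
      exact ⟨(k, t'), ⟨ht', hge⟩, rfl⟩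
  unfold pvKeep
  cases inList with
  | nil => exact absurd rfl hne
  | cons d0 t =>
    rw [List.map_cons]
    rw [pv_mem_foldl_inter]
    constructor
    · rintro ⟨h1, h2⟩ d hd
      rcases List.mem_cons.mp hd with rfl | hd'
      · exact (hqual d).mp h1
      · exact (hqual d).mp (h2 _ (List.mem_map_of_mem hd'))
    · intro h
      refine ⟨(hqual d0).mpr (h d0 (by simp)), ?_⟩
      intro s hs
      obtain ⟨d, hd, rfl⟩ := List.mem_map.mp hs
      exact (hqual d).mpr (h d (List.mem_cons_of_mem _ hd))

-- tempDict.items = d.filter (k in bb)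
theorem pv_trim (d : List (String × List (Int × Int))) (bb : List String)
    (hnd : (d.map (fun p => p.1)).Nodup) :
    (d.foldl (fun td p =>
        if bb.contains p.1 then td.insert p.1 ((PySem.Dict.mk d).getD p.1 p.2) else td)
      PySem.Dict.empty).items = d.filter (fun p => bb.contains p.1) := by
  rw [pv_foldl_if_skip]
  rw [PySem.Dict.items_foldl_insert_fresh (d.filter (fun p => bb.contains p.1)) (fun p => p.1)
      (fun p => (PySem.Dict.mk d).getD p.1 p.2) PySem.Dict.empty
      (by intro a _; exact PySem.Dict.contains_empty _)
      (by
        have : ((d.filter (fun p => bb.contains p.1)).map (fun p => p.1)).Sublist (d.map (fun p => p.1)) :=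
          List.Sublist.map _ List.filter_sublist
        exact this.nodup hnd)]
  simp only [PySem.Dict.empty, List.nil_append]
  have hmap : ∀ p ∈ d.filter (fun p => bb.contains p.1),
      ((p.1, (PySem.Dict.mk d).getD p.1 p.2) : String × List (Int × Int)) = id p := by
    intro p hp
    have hpd : p ∈ d := List.mem_of_mem_filter hp
    have hv : (PySem.Dict.mk d).getD p.1 p.2 = p.2 := by
      apply PySem.Dict.getD_of_mem_items
      · exact hpd
      · simpa [PySem.Dict.keys_mk] using hnd
    simp [hv]
  rw [List.map_congr_left hmap, List.map_id]

-- ===== VERDICT (by name: the statement is the Claim_ definition above) =====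
theorem restrict_spec : Claim_equal_restrict := by
  intro inList N _ hpre
  unfold Spec_restrict
  by_cases hne : inList = []
  · subst hne; rfl
  · have hA : restrict inList N =
        inList.foldl (fun cc inDict =>
          cc ++ [(inDict.foldl (fun td p =>
            if (pvBB inList N).contains p.1 then
              td.insert p.1 ((PySem.Dict.mk inDict).getD p.1 p.2)
            else td) PySem.Dict.empty).items]) [] := rfl
    have hB : restrict_alt inList N =
        inList.map (fun d => d.filter (fun p => (pvKeep inList N).contains p.1)) := rfl
    rw [hA, hB, PySem.List.foldl_append_singleton_eq_map, List.nil_append]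
    apply List.map_congr_left
    intro d hd
    rw [pv_trim d (pvBB inList N) (hpre d hd)]
    apply List.filter_congr
    intro p _
    have h1 : ((pvBB inList N).contains p.1 = true) ↔ p.1 ∈ pvBB inList N := List.contains_iff_mem
    have h2 : ((pvKeep inList N).contains p.1 = true) ↔ p.1 ∈ pvKeep inList N := List.contains_iff_mem
    rw [Bool.eq_iff_iff, h1, h2, pv_mem_bb inList N p.1 hne hpre, pv_mem_keep inList N p.1 hne]
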